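-- pv_equiv track=rewrite | github.com/MadMaxChow/VLOOK | docs/dev/diff_js_chars.py | build_line_col_map
-- ===== SOURCE A (Python) =====
-- def build_line_col_map(js_code):
--     """把 index 映射成 (line, col)"""
--     line = col = 0
--     mapping = []
--     for ch in js_code:
--         mapping.append((line, col))
--         if ch == "\n":
--             line += 1
--             col = 0
--         else:
--             col += 1
--     return mapping
-- ===== SOURCE B (Python) =====
-- def build_line_col_map(js_code):
--     parts = js_code.split("\n")
--     mapping = []
--     last = len(parts) - 1
--     for line_no, part in enumerate(parts):
--         for col in range(len(part)):
--             mapping.append((line_no, col))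
--         if line_no != last:
--             mapping.append((line_no, len(part)))
--     return mapping
-- ===== Notes on version B (the rewrite author's own statement) =====
-- stated objective: alternative
-- what changed: B first splits the code on the newline character into a line table and then emits positions with a nested loop over enumerate(lines) (columns per line, plus one entry for each consumed newline), instead of A's single flat character scan carrying (line, col) state.
import Mathlib
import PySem

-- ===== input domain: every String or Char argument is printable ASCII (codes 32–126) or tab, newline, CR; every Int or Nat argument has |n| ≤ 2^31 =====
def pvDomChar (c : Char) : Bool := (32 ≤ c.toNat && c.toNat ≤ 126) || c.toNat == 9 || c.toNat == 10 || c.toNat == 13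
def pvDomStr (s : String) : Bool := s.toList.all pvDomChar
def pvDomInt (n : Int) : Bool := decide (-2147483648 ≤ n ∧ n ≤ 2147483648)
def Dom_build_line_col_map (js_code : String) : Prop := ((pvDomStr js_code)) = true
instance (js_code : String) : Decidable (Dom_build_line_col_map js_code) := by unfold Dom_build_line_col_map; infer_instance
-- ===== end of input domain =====

-- B replaces A's flat character scan carrying (line, col) state by a split('\n') line table
-- walked with a nested enumerate/range loop (objective: alternative decomposition, same cost).


-- ===== PORT A =====
-- flat scan: state (line, col, mapping); append (line, col) for each char, newline resets col
def build_line_col_map (js_code : String) : List (Int × Int) :=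
  (js_code.toList.foldl
    (fun (st : Int × Int × List (Int × Int)) ch =>
      let mapping := st.2.2 ++ [(st.1, st.2.1)]
      if ch = '\n' then (st.1 + 1, 0, mapping) else (st.1, st.2.1 + 1, mapping))
    (0, 0, [])).2.2

-- ===== PORT B =====
-- parts = js_code.split('\n'); nested loop over enumerate(parts) with an inner range(len(part)),
-- plus one (line_no, len(part)) entry for the newline after every part except the last
def build_line_col_map_alt (js_code : String) : List (Int × Int) :=
  let parts := PySem.Chars.splitOn js_code.toList ['\n']
  let last : Int := (parts.length : Int) - 1
  (PySem.List.enumerate parts 0).foldl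
    (fun mapping p =>
      let mapping := (PySem.List.pyRange 0 (p.2.length : Int) 1).foldl
        (fun m col => m ++ [(p.1, col)]) mapping
      if p.1 ≠ last then mapping ++ [(p.1, (p.2.length : Int))] else mapping)
    []

-- ===== PRECONDITION & SPEC =====
def Spec_build_line_col_map (js_code : String) (out : List (Int × Int)) : Prop := out = build_line_col_map_alt js_code
instance (js_code : String) (out : List (Int × Int)) : Decidable (Spec_build_line_col_map js_code out) := by unfold Spec_build_line_col_map; infer_instance

-- ===== CLAIM (what is proved, stated in full; the proofs are below) =====
def Claim_equal_build_line_col_map : Prop := ∀ (js_code : String), Dom_build_line_col_map js_code → Spec_build_line_col_map js_code (build_line_col_map js_code)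

-- ===== LEMMAS AND PROOFS =====

-- common specification: positions emitted from state (line, col) onward
def fspec : Int → Int → List Char → List (Int × Int)
  | _, _, [] => []
  | line, col, c :: cs =>
    (line, col) :: if c = '\n' then fspec (line + 1) 0 cs else fspec line (col + 1) cs

-- A's fold appends fspec to the accumulated mapping
theorem foldA_eq (cs : List Char) (line col : Int) (acc : List (Int × Int)) :
    (cs.foldl
      (fun (st : Int × Int × List (Int × Int)) ch =>
        let mapping := st.2.2 ++ [(st.1, st.2.1)]
        if ch = '\n' then (st.1 + 1, 0, mapping) else (st.1, st.2.1 + 1, mapping))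
      (line, col, acc)).2.2 = acc ++ fspec line col cs := by
  induction cs generalizing line col acc with
  | nil => simp [fspec]
  | cons c cs ih =>
    by_cases hc : c = '\n' <;> simp [fspec, hc, ih]

-- structural model of PySem.Chars.splitOn on the single-char separator '\n'
def mysplit : List Char → List Char → List (List Char)
  | cur, [] => [cur.reverse]
  | cur, c :: rest => if c = '\n' then cur.reverse :: mysplit [] rest else mysplit (c :: cur) rest

theorem go_eq (fuel : Nat) (l cur : List Char) (acc : List (List Char)) (h : l.length < fuel) :
    PySem.Chars.splitOn.go ['\n'] fuel l cur acc = acc.reverse ++ mysplit cur l := by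
  induction fuel generalizing l cur acc with
  | zero => omega
  | succ n ih =>
    cases l with
    | nil => simp [PySem.Chars.splitOn.go, mysplit]
    | cons c rest =>
      by_cases hc : c = '\n'
      · subst hc
        simp [PySem.Chars.splitOn.go, List.isPrefixOf, mysplit, ih rest [] _ (by simpa using h)]
      · simp [PySem.Chars.splitOn.go, List.isPrefixOf, hc, mysplit,
          ih rest (c :: cur) acc (by simpa using h), Ne.symm hc]

theorem splitOn_eq (cs : List Char) : PySem.Chars.splitOn cs ['\n'] = mysplit [] cs := by
  simpa using go_eq (cs.length + 1) cs [] [] (by omega)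

theorem mysplit_ne_nil (cur cs : List Char) : mysplit cur cs ≠ [] := by
  induction cs generalizing cur with
  | nil => simp [mysplit]
  | cons c rest ih => by_cases hc : c = '\n' <;> simp [mysplit, hc, ih]

theorem mysplit_head_len (cur cs : List Char) :
    cur.length ≤ ((mysplit cur cs).headD []).length := by
  induction cs generalizing cur with
  | nil => simp [mysplit]
  | cons c rest ih =>
    by_cases hc : c = '\n'
    · simp [mysplit, hc]
    · simp only [mysplit, hc, if_false]
      have := ih (c :: cur)
      simpa using Nat.le_of_succ_le (by simpa using this)

-- positions produced from a list of parts, the first part starting at column k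
def hOff : Int → Int → List (List Char) → List (Int × Int)
  | _, _, [] => []
  | s, k, p :: ps =>
    (PySem.List.pyRange k (p.length : Int) 1).map (fun c => (s, c)) ++
      (if ps = [] then [] else (s, (p.length : Int)) :: hOff (s + 1) 0 ps)

theorem hOff_cons_col (s k : Int) (q : List Char) (qs : List (List Char)) (h : k < (q.length : Int)) :
    hOff s k (q :: qs) = (s, k) :: hOff s (k + 1) (q :: qs) := by
  simp only [hOff, PySem.List.pyRange_one_cons h, List.map_cons]
  split <;> simp

theorem fspec_eq_hOff (cs cur : List Char) (line : Int) :
    fspec line (cur.length : Int) cs = hOff line (cur.length : Int) (mysplit cur cs) := by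
  induction cs generalizing cur line with
  | nil => simp [fspec, mysplit, hOff, PySem.List.pyRange_one_eq_nil le_rfl]
  | cons c rest ih =>
    by_cases hc : c = '\n'
    · subst hc
      have hne := mysplit_ne_nil ([] : List Char) rest
      have h0 := ih [] (line + 1)
      simp only [List.length_nil, Int.natCast_zero] at h0
      simp [fspec, mysplit, hOff, hne, h0,
        PySem.List.pyRange_one_eq_nil (le_refl ((cur.length : Int)))]
    · obtain ⟨q, qs, hq⟩ : ∃ q qs, mysplit (c :: cur) rest = q :: qs := by
        cases hms : mysplit (c :: cur) rest with
        | nil => exact absurd hms (mysplit_ne_nil _ _)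
        | cons q qs => exact ⟨q, qs, rfl⟩
      have hlen : ((cur.length : Int) + 1) ≤ (q.length : Int) := by
        have := mysplit_head_len (c :: cur) rest
        rw [hq] at this
        simp at this
        omega
      have ihc := ih (c :: cur) line
      simp only [List.length_cons, hq] at ihc
      simp only [fspec, mysplit, if_neg hc, hq]
      rw [hOff_cons_col line _ q qs (by omega)]
      push_cast at ihc ⊢
      rw [ihc]

-- B's outer fold appends hOff when the parts end exactly at index `last`
theorem foldB_eq (ps : List (List Char)) (s : Int) (L : Int) (acc : List (Int × Int))
    (hne : ps ≠ []) (hL : s + (ps.length : Int) = L + 1) :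
    (PySem.List.enumerate ps s).foldl
      (fun mapping p =>
        let mapping := (PySem.List.pyRange 0 (p.2.length : Int) 1).foldl
          (fun m col => m ++ [(p.1, col)]) mapping
        if p.1 ≠ L then mapping ++ [(p.1, (p.2.length : Int))] else mapping)
      acc = acc ++ hOff s 0 ps := by
  induction ps generalizing s acc with
  | nil => exact absurd rfl hne
  | cons p ps ih =>
    rw [PySem.List.enumerate_cons, List.foldl_cons]
    have hinner := PySem.List.foldl_append_singleton_eq_map
      (f := fun col => (s, col)) (l := PySem.List.pyRange 0 (p.length : Int) 1) (acc := acc)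
    cases ps with
    | nil =>
      have hsL : s = L := by simp at hL; omega
      subst hsL
      simp [PySem.List.enumerate_nil, hOff, hinner]
    | cons q qs =>
      have hsne : s ≠ L := by simp at hL; omega
      simp only [ne_eq, hsne, not_false_iff, if_pos trivial]
      rw [hinner,
        ih (s + 1) _ (by simp)
          (by simp only [List.length_cons] at hL ⊢; push_cast at hL ⊢; omega)]
      simp [hOff]

-- ===== VERDICT (by name: the statement is the Claim_ definition above) =====
theorem build_line_col_map_spec : Claim_equal_build_line_col_map := by
  intro js _
  unfold Spec_build_line_col_map build_line_col_map build_line_col_map_alt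
  rw [foldA_eq, splitOn_eq]
  have hB := foldB_eq (mysplit [] js.toList) 0 ((((mysplit [] js.toList).length : Int)) - 1) []
    (mysplit_ne_nil _ _) (by omega)
  rw [hB]
  have := fspec_eq_hOff js.toList [] 0
  simpa using this
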